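-- pv_equiv track=rewrite | github.com/lbez0019/lb_uva_msc_thesis | action_parser.py | calculate_permutations
-- ===== SOURCE A (Python) =====
-- def calculate_permutations(operands, operators, parsed_operators, tokens):
--     permutations = []
--     for i in range(2 ** len(operands)):
--         binary = bin(i)[2:].zfill(len(operands))
--         operand_permutation = [operands[j] if bit == '0' else 'True' for j, bit in enumerate(binary)]
--
--         # Reintroduce the operators in their original place
--         expression_permutation = []
--         operand_index = 0
--         operator_index = 0
--
--         for token in tokens:
--             if token not in operators:
--                 expression_permutation.append(operand_permutation[operand_index])
--                 operand_index += 1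
--             else:
--                 expression_permutation.append(parsed_operators[operator_index])
--                 operator_index += 1
--
--         permutations.append(expression_permutation)
--
--     return permutations
-- ===== SOURCE B (Python) =====
-- def calculate_permutations(operands, operators, parsed_operators, tokens):
--     # Build the expression template once: operator tokens resolved to parsed
--     # operators, operand slots marked with None.
--     template = []
--     k = 0
--     for token in tokens:
--         if token in operators:
--             template.append(parsed_operators[k])
--             k += 1
--         else:
--             template.append(None)
--     # All choice vectors (one entry per operand: itself or 'True'), in the
--     # order of binary counting with the first operand as the most significant bit.
--     assignments = [[]]
--     for op in operands:
--         assignments = [a + [v] for a in assignments for v in (op, 'True')]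
--     result = []
--     for choice in assignments:
--         row = []
--         idx = 0
--         for cell in template:
--             if cell is None:
--                 row.append(choice[idx])
--                 idx += 1
--             else:
--                 row.append(cell)
--         result.append(row)
--     return result
-- ===== Notes on version B (the rewrite author's own statement) =====
-- stated objective: faster
-- what changed: B precomputes the expression template once (operator tokens resolved to parsed operators, operand slots marked) and builds the 2^n choice vectors by iterative doubling, instead of re-scanning tokens, re-testing operator membership and decoding a bin()/zfill string inside every one of the 2^n iterations.
-- crash fix: When operands is empty (bin(0)[2:].zfill(0) is still '0', so A always indexes operands[0] and raises IndexError) while all tokens are operators with enough parsed operators, B naturally returns the single operator-only row. — e.g. on calculate_permutations([], ["+"], ["and"], ["+"]): A raises IndexError, B returns [["and"]]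
import Mathlib
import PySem

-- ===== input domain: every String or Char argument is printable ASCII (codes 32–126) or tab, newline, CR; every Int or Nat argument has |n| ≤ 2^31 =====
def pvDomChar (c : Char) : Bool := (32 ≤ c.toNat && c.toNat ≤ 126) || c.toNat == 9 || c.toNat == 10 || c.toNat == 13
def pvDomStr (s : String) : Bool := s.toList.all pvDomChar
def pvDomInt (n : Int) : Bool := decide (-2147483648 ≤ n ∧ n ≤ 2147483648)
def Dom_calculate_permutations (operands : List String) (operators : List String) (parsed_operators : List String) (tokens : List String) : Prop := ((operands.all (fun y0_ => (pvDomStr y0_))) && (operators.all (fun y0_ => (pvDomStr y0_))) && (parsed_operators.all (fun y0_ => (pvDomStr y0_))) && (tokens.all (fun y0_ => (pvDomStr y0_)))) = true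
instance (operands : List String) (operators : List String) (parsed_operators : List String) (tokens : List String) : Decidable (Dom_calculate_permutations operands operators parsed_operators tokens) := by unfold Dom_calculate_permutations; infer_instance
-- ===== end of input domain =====

-- B precomputes the expression template once (operators resolved, operand slots marked) and
-- builds the 2^n choice vectors by iterative doubling, instead of re-scanning tokens and
-- decoding a bin()/zfill string in every one of the 2^n iterations (objective: faster, constant factor).

-- ===== PORT A =====
-- bin(i)[2:] for i ≥ 0 is PySem.Int.toBinChars; .zfill(n) is the literal left pad with '0'.
def calculate_permutations (operands : List String) (operators : List String) (parsed_operators : List String) (tokens : List String) : List (List String) :=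
  (List.range (2 ^ operands.length)).foldl (fun permutations i =>
    let binary : List Char :=
      List.replicate (operands.length - (PySem.Int.toBinChars (Int.ofNat i)).length) '0'
        ++ PySem.Int.toBinChars (Int.ofNat i)
    let operand_permutation : List String :=
      (PySem.List.enumerate binary 0).map (fun jb =>
        if jb.2 = '0' then PySem.List.pyGetD operands jb.1 "" else "True")
    let st := tokens.foldl (fun (st : List String × Nat × Nat) token =>
      if !(operators.contains token) then
        (st.1 ++ [PySem.List.pyGetD operand_permutation (Int.ofNat st.2.1) ""], st.2.1 + 1, st.2.2)
      else
        (st.1 ++ [PySem.List.pyGetD parsed_operators (Int.ofNat st.2.2) ""], st.2.1, st.2.2 + 1))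
      (([] : List String), 0, 0)
    permutations ++ [st.1]) []

-- ===== PORT B =====
def calculate_permutations_alt (operands : List String) (operators : List String) (parsed_operators : List String) (tokens : List String) : List (List String) :=
  let tk := tokens.foldl (fun (st : List (Option String) × Nat) token =>
      if operators.contains token then
        (st.1 ++ [some (PySem.List.pyGetD parsed_operators (Int.ofNat st.2) "")], st.2 + 1)
      else
        (st.1 ++ [(none : Option String)], st.2)) (([] : List (Option String)), 0)
  let template := tk.1
  let assignments := operands.foldl
      (fun assignments op => assignments.flatMap (fun a => [a ++ [op], a ++ ["True"]]))
      [([] : List String)]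
  assignments.foldl (fun result choice =>
      let rw := template.foldl (fun (st : List String × Nat) cell =>
          match cell with
          | none => (st.1 ++ [PySem.List.pyGetD choice (Int.ofNat st.2) ""], st.2 + 1)
          | some s => (st.1 ++ [s], st.2)) (([] : List String), 0)
      result ++ [rw.1]) []

-- ===== PRECONDITION & SPEC =====
-- Pre_ is exactly where the Python A returns (everything excluded is an IndexError of A):
-- when operands = [], bin(0)[2:].zfill(0) is still the one-character string '0', so A's
-- comprehension indexes operands[0] and raises IndexError for EVERY tokens list; A also
-- raises IndexError when tokens has more non-operator tokens than operands, or more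
-- operator tokens than parsed_operators.
def Pre_calculate_permutations (operands : List String) (operators : List String) (parsed_operators : List String) (tokens : List String) : Prop :=
  operands ≠ [] ∧
  tokens.countP (fun t => !(operators.contains t)) ≤ operands.length ∧
  tokens.countP (fun t => operators.contains t) ≤ parsed_operators.length
instance (operands : List String) (operators : List String) (parsed_operators : List String) (tokens : List String) : Decidable (Pre_calculate_permutations operands operators parsed_operators tokens) := by unfold Pre_calculate_permutations; infer_instance

def pvWitness_calculate_permutations : List String × List String × List String × List String :=
  (["a", "b"], ["+"], ["and"], ["a", "+", "b"])

-- When operands is empty (so A raises IndexError unconditionally) but every token is an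
-- operator with enough parsed operators, B naturally returns the single operator-only row.
def Raises_calculate_permutations (operands : List String) (operators : List String) (parsed_operators : List String) (tokens : List String) : Prop :=
  operands = [] ∧ (∀ t ∈ tokens, t ∈ operators) ∧ tokens.length ≤ parsed_operators.length
instance (operands : List String) (operators : List String) (parsed_operators : List String) (tokens : List String) : Decidable (Raises_calculate_permutations operands operators parsed_operators tokens) := by unfold Raises_calculate_permutations; infer_instance

def pvRaiseWitness_calculate_permutations : List String × List String × List String × List String :=
  ([], ["+"], ["and"], ["+"])
def pvRaiseWitnessOut_calculate_permutations : List (List String) := [["and"]]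

def Spec_calculate_permutations (operands : List String) (operators : List String) (parsed_operators : List String) (tokens : List String) (out : List (List String)) : Prop := out = calculate_permutations_alt operands operators parsed_operators tokens
instance (operands : List String) (operators : List String) (parsed_operators : List String) (tokens : List String) (out : List (List String)) : Decidable (Spec_calculate_permutations operands operators parsed_operators tokens out) := by unfold Spec_calculate_permutations; infer_instance

-- ===== CLAIM (what is proved, stated in full; the proofs are below) =====
def Claim_equal_calculate_permutations : Prop := ∀ (operands : List String) (operators : List String) (parsed_operators : List String) (tokens : List String), Dom_calculate_permutations operands operators parsed_operators tokens → Pre_calculate_permutations operands operators parsed_operators tokens → Spec_calculate_permutations operands operators parsed_operators tokens (calculate_permutations operands operators parsed_operators tokens)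

def Claim_raises_calculate_permutations : Prop := (∀ (operands : List String) (operators : List String) (parsed_operators : List String) (tokens : List String), Dom_calculate_permutations operands operators parsed_operators tokens → Raises_calculate_permutations operands operators parsed_operators tokens → ¬ Pre_calculate_permutations operands operators parsed_operators tokens) ∧ (Dom_calculate_permutations (pvRaiseWitness_calculate_permutations.1) (pvRaiseWitness_calculate_permutations.2.1) (pvRaiseWitness_calculate_permutations.2.2.1) (pvRaiseWitness_calculate_permutations.2.2.2) ∧ Raises_calculate_permutations (pvRaiseWitness_calculate_permutations.1) (pvRaiseWitness_calculate_permutations.2.1) (pvRaiseWitness_calculate_permutations.2.2.1) (pvRaiseWitness_calculate_permutations.2.2.2) ∧ calculate_permutations_alt (pvRaiseWitness_calculate_permutations.1) (pvRaiseWitness_calculate_permutations.2.1) (pvRaiseWitness_calculate_permutations.2.2.1) (pvRaiseWitness_calculate_permutations.2.2.2) = pvRaiseWitnessOut_calculate_permutations)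

-- ===== LEMMAS AND PROOFS =====

-- A's inner token loop, as a recursive function.
def pvRowOf (operators parsed_operators c : List String) : List String → Nat → Nat → List String
  | [], _, _ => []
  | t :: ts, oi, ki =>
    if !(operators.contains t) then
      PySem.List.pyGetD c (Int.ofNat oi) "" :: pvRowOf operators parsed_operators c ts (oi + 1) ki
    else
      PySem.List.pyGetD parsed_operators (Int.ofNat ki) "" :: pvRowOf operators parsed_operators c ts oi (ki + 1)

-- B's template loop, as a recursive function.
def pvTmpl (operators parsed_operators : List String) : List String → Nat → List (Option String)
  | [], _ => []
  | t :: ts, k =>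
    if operators.contains t then
      some (PySem.List.pyGetD parsed_operators (Int.ofNat k) "") :: pvTmpl operators parsed_operators ts (k + 1)
    else
      none :: pvTmpl operators parsed_operators ts k

-- B's row-filling loop, as a recursive function.
def pvFill (c : List String) : List (Option String) → Nat → List String
  | [], _ => []
  | none :: cs, idx => PySem.List.pyGetD c (Int.ofNat idx) "" :: pvFill c cs (idx + 1)
  | some s :: cs, idx => s :: pvFill c cs idx

-- MSB-first binary digits of i, width n (i taken mod 2^n).
def pvBdig : Nat → Nat → List Char
  | 0, _ => []
  | n + 1, i => pvBdig n (i / 2) ++ [if i % 2 = 0 then '0' else '1']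

-- Minimal binary digit string of i (what bin(i)[2:] produces).
def pvBinMin : Nat → List Char
  | 0 => ['0']
  | 1 => ['1']
  | n + 2 => pvBinMin ((n + 2) / 2) ++ [if (n + 2) % 2 = 0 then '0' else '1']
decreasing_by omega

def pvChoice (ops : List String) (bits : List Char) : List String :=
  List.zipWith (fun op b => if b = '0' then op else "True") ops bits

theorem pvRowOf_foldl (operators parsed_operators c : List String) (ts : List String) :
    ∀ (acc : List String) (oi ki : Nat),
    (ts.foldl (fun (st : List String × Nat × Nat) token =>
      if !(operators.contains token) then
        (st.1 ++ [PySem.List.pyGetD c (Int.ofNat st.2.1) ""], st.2.1 + 1, st.2.2)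
      else
        (st.1 ++ [PySem.List.pyGetD parsed_operators (Int.ofNat st.2.2) ""], st.2.1, st.2.2 + 1))
      (acc, oi, ki)).1 = acc ++ pvRowOf operators parsed_operators c ts oi ki := by
  induction ts with
  | nil => intro acc oi ki; simp [pvRowOf]
  | cons t ts ih =>
    intro acc oi ki
    by_cases h : t ∈ operators
    · have hb : (!operators.contains t) = false := by simp [h]
      simp only [List.foldl_cons, pvRowOf, hb, Bool.false_eq_true, if_false, ih]
      simp
    · have hb : (!operators.contains t) = true := by simp [h]
      simp only [List.foldl_cons, pvRowOf, hb, if_true, ih]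
      simp

theorem pvTmpl_foldl (operators parsed_operators : List String) (ts : List String) :
    ∀ (acc : List (Option String)) (k : Nat),
    (ts.foldl (fun (st : List (Option String) × Nat) token =>
      if operators.contains token then
        (st.1 ++ [some (PySem.List.pyGetD parsed_operators (Int.ofNat st.2) "")], st.2 + 1)
      else
        (st.1 ++ [(none : Option String)], st.2)) (acc, k)).1 = acc ++ pvTmpl operators parsed_operators ts k := by
  induction ts with
  | nil => intro acc k; simp [pvTmpl]
  | cons t ts ih =>
    intro acc k
    by_cases h : t ∈ operators
    · have hb : operators.contains t = true := by simpa using h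
      simp only [List.foldl_cons, pvTmpl, hb, if_true, ih]
      simp
    · have hb : operators.contains t = false := by simpa using h
      simp only [List.foldl_cons, pvTmpl, hb, Bool.false_eq_true, if_false, ih]
      simp

theorem pvFill_foldl (c : List String) (tmpl : List (Option String)) :
    ∀ (acc : List String) (idx : Nat),
    (tmpl.foldl (fun (st : List String × Nat) cell =>
      match cell with
      | none => (st.1 ++ [PySem.List.pyGetD c (Int.ofNat st.2) ""], st.2 + 1)
      | some s => (st.1 ++ [s], st.2)) (acc, idx)).1 = acc ++ pvFill c tmpl idx := by
  induction tmpl with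
  | nil => intro acc idx; simp [pvFill]
  | cons cell cs ih =>
    intro acc idx
    cases cell with
    | none =>
      simp only [List.foldl_cons, pvFill, ih]
      simp
    | some s =>
      simp only [List.foldl_cons, pvFill, ih]
      simp

-- The bridge between A's token rescanning and B's template filling.
theorem pvRowOf_eq_fill (operators parsed_operators : List String) (ts : List String) :
    ∀ (c : List String) (oi ki : Nat),
    pvRowOf operators parsed_operators c ts oi ki = pvFill c (pvTmpl operators parsed_operators ts ki) oi := by
  induction ts with
  | nil => intro c oi ki; simp [pvRowOf, pvTmpl, pvFill]
  | cons t ts ih =>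
    intro c oi ki
    by_cases h : t ∈ operators
    · have hb : operators.contains t = true := by simpa using h
      simp only [pvRowOf, pvTmpl, pvFill, hb, Bool.not_true, Bool.false_eq_true, if_false, if_true, ih]
    · have hb : operators.contains t = false := by simpa using h
      simp only [pvRowOf, pvTmpl, pvFill, hb, Bool.not_false, Bool.false_eq_true, if_false, if_true, ih]

theorem pvBdig_length (n i : Nat) : (pvBdig n i).length = n := by
  induction n generalizing i with
  | zero => simp [pvBdig]
  | succ n ih => simp [pvBdig, ih]

theorem pvBdig_zero (n : Nat) : pvBdig n 0 = List.replicate n '0' := by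
  induction n with
  | zero => simp [pvBdig]
  | succ n ih => simp [pvBdig, ih, List.replicate_succ' ]

-- Nat.toDigitsCore with enough fuel computes pvBinMin.
theorem toDigitsCore_eq_binMin :
    ∀ (fuel n : Nat) (acc : List Char), n < fuel →
    Nat.toDigitsCore 2 fuel n acc = pvBinMin n ++ acc := by
  intro fuel
  induction fuel with
  | zero => intro n acc h; omega
  | succ fuel ih =>
    intro n acc h
    rw [Nat.toDigitsCore]
    by_cases h2 : n / 2 = 0
    · have : n = 0 ∨ n = 1 := by omega
      rcases this with rfl | rfl <;> simp [h2, pvBinMin, Nat.digitChar]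
    · have hn2 : 2 ≤ n := by omega
      simp only [h2, if_false]
      rw [ih (n / 2) _ (by omega)]
      obtain ⟨m, rfl⟩ : ∃ m, n = m + 2 := ⟨n - 2, by omega⟩
      rw [pvBinMin]
      rcases Nat.mod_two_eq_zero_or_one (m + 2) with hm | hm <;>
        simp [hm, Nat.digitChar]

theorem toDigits_eq_binMin (n : Nat) : Nat.toDigits 2 n = pvBinMin n := by
  rw [Nat.toDigits, toDigitsCore_eq_binMin (n + 1) n [] (by omega), List.append_nil]

theorem toBinChars_natCast (i : Nat) : PySem.Int.toBinChars (Int.ofNat i) = pvBinMin i := by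
  rw [PySem.Int.toBinChars]
  simp [toDigits_eq_binMin]

-- zfill of the minimal binary string is the fixed-width digit list.
theorem zfill_binMin (n : Nat) :
    ∀ i : Nat, i < 2 ^ (n + 1) →
    List.replicate ((n + 1) - (pvBinMin i).length) '0' ++ pvBinMin i = pvBdig (n + 1) i := by
  induction n with
  | zero =>
    intro i hi
    interval_cases i <;> simp [pvBinMin, pvBdig]
  | succ n ih =>
    intro i hi
    by_cases h1 : i ≤ 1
    · interval_cases i
      · rw [pvBdig]
        simp [pvBinMin, pvBdig_zero, List.replicate_succ']
      · rw [pvBdig]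
        have : (1 : Nat) / 2 = 0 := by omega
        rw [this, pvBdig_zero]
        simp [pvBinMin, List.replicate_succ']
    · obtain ⟨m, rfl⟩ : ∃ m, i = m + 2 := ⟨i - 2, by omega⟩
      rw [pvBdig, ← ih ((m + 2) / 2) (by omega), pvBinMin]
      simp only [List.length_append, List.length_singleton]
      have : (n + 1 + 1) - ((pvBinMin ((m + 2) / 2)).length + 1)
           = (n + 1) - (pvBinMin ((m + 2) / 2)).length := by omega
      rw [this, List.append_assoc]

-- A's list comprehension over the enumerated bit string is zipWith over operands.
theorem enumerate_map_eq_choice (ops : List String) (l : List Char) (hl : l.length = ops.length) :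
    (PySem.List.enumerate l 0).map (fun jb =>
      if jb.2 = '0' then PySem.List.pyGetD ops jb.1 "" else "True")
    = pvChoice ops l := by
  apply List.ext_getElem
  · simp [pvChoice, hl, PySem.List.length_enumerate]
  · intro k hk1 hk2
    have hkl : k < l.length := by
      simp [PySem.List.length_enumerate] at hk1; exact hk1
    have hko : k < ops.length := by omega
    simp only [List.getElem_map, PySem.List.getElem_enumerate, pvChoice, List.getElem_zipWith]
    have : (0 : Int) + (k : Int) = ((k : Nat) : Int) := by omega
    rw [this, PySem.List.pyGetD_natCast, List.getD_eq_getElem _ _ hko]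

-- range over a doubled bound, split into even/odd pairs.
theorem pvRangeTwoMul (m : Nat) :
    List.range (2 * m) = (List.range m).flatMap (fun q => [2 * q, 2 * q + 1]) := by
  induction m with
  | zero => simp
  | succ m ih =>
    have : 2 * (m + 1) = (2 * m + 1) + 1 := by omega
    rw [this, List.range_succ, List.range_succ, List.range_succ, ih]
    simp [List.flatMap_append]

-- B's iterative doubling enumerates exactly the fixed-width binary choice vectors in order.
theorem assignments_eq (ops : List String) :
    ops.foldl (fun assignments op => assignments.flatMap (fun a => [a ++ [op], a ++ ["True"]]))
      [([] : List String)]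
    = (List.range (2 ^ ops.length)).map (fun i => pvChoice ops (pvBdig ops.length i)) := by
  induction ops using List.reverseRecOn with
  | nil => simp [pvChoice, pvBdig]
  | append_singleton ops op ih =>
    rw [List.foldl_append, List.foldl_cons, List.foldl_nil, ih]
    have hpow : 2 ^ (ops ++ [op]).length = 2 * 2 ^ ops.length := by
      simp [List.length_append]; ring
    rw [hpow, pvRangeTwoMul, List.flatMap_map, List.map_flatMap]
    apply List.flatMap_congr
    intro q _
    have key : ∀ c : Nat, c < 2 →
        pvChoice (ops ++ [op]) (pvBdig (ops ++ [op]).length (2 * q + c))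
        = pvChoice ops (pvBdig ops.length q) ++ [if c = 0 then op else "True"] := by
      intro c hc
      have hlen : (ops ++ [op]).length = ops.length + 1 := by simp
      rw [hlen, pvBdig]
      have hdiv : (2 * q + c) / 2 = q := by omega
      have hmod : (2 * q + c) % 2 = c := by omega
      rw [hdiv, hmod, pvChoice, pvChoice,
        List.zipWith_append ((pvBdig_length ops.length q).symm ▸ rfl)]
      simp only [List.zipWith_cons_cons, List.zipWith_nil_right]
      rcases (by omega : c = 0 ∨ c = 1) with rfl | rfl <;> simp
    simp only [List.map_cons, List.map_nil]
    have k0 := key 0 (by omega)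
    have k1 := key 1 (by omega)
    norm_num at k0 k1
    simp [k0, k1]

-- ===== VERDICT (by name: the statement is the Claim_ definition above) =====
theorem calculate_permutations_spec : Claim_equal_calculate_permutations := by
  intro operands operators parsed_operators tokens _hDom hPre
  unfold Spec_calculate_permutations
  obtain ⟨hne, _, _⟩ := hPre
  have hn : 1 ≤ operands.length := by
    cases operands with
    | nil => exact absurd rfl hne
    | cons a l => simp
  have hA : calculate_permutations operands operators parsed_operators tokens
      = (List.range (2 ^ operands.length)).map (fun i =>
          pvRowOf operators parsed_operators
            ((PySem.List.enumerate
              (List.replicate (operands.length - (PySem.Int.toBinChars (Int.ofNat i)).length) '0'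
                ++ PySem.Int.toBinChars (Int.ofNat i)) 0).map (fun jb =>
                if jb.2 = '0' then PySem.List.pyGetD operands jb.1 "" else "True"))
            tokens 0 0) := by
    simp only [calculate_permutations, pvRowOf_foldl, List.nil_append,
      PySem.List.foldl_append_singleton_eq_map]
  have hB : calculate_permutations_alt operands operators parsed_operators tokens
      = ((List.range (2 ^ operands.length)).map (fun i => pvChoice operands (pvBdig operands.length i))).map
          (fun c => pvFill c (pvTmpl operators parsed_operators tokens 0) 0) := by
    simp only [calculate_permutations_alt, pvTmpl_foldl, pvFill_foldl, List.nil_append,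
      PySem.List.foldl_append_singleton_eq_map, assignments_eq]
  rw [hA, hB, List.map_map]
  apply List.map_congr_left
  intro i hi
  have hi2 : i < 2 ^ operands.length := List.mem_range.mp hi
  obtain ⟨n, hn'⟩ : ∃ n, operands.length = n + 1 := ⟨operands.length - 1, by omega⟩
  have hbin : List.replicate (operands.length - (PySem.Int.toBinChars (Int.ofNat i)).length) '0'
      ++ PySem.Int.toBinChars (Int.ofNat i) = pvBdig operands.length i := by
    rw [toBinChars_natCast, hn']
    exact zfill_binMin n i (by rw [← hn']; exact hi2)
  rw [hbin, enumerate_map_eq_choice operands (pvBdig operands.length i) (pvBdig_length _ _),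
    Function.comp, pvRowOf_eq_fill]

@[simp] theorem calculate_permutations_raises : Claim_raises_calculate_permutations := by
  unfold Claim_raises_calculate_permutations
  exact ⟨by intro _ _ _ _ _ hR hP; exact hP.1 hR.1, by decide⟩
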